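-- pv_equiv track=rewrite | github.com/choibyeol/algorithm | 프로그래머스/Python3/고득점 kit/정렬.py | hLen
-- ===== SOURCE A (Python) =====
-- def hLen(citations, h):
--     max_ans = 0
--     min_ans = 0
--     for num in citations:
--         if num >= h:
--             max_ans += 1
--         else:
--             min_ans += 1
--     return min_ans, max_ans
-- ===== SOURCE B (Python) =====
-- def hLen(citations, h):
--     s = sorted(citations)
--     lo, hi = 0, len(s)
--     while lo < hi:
--         mid = (lo + hi) // 2
--         if s[mid] < h:
--             lo = mid + 1
--         else:
--             hi = mid
--     return lo, len(s) - lo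
-- ===== Notes on version B (the rewrite author's own statement) =====
-- stated objective: alternative
-- what changed: B sorts the list and binary-searches for the first position whose value is >= h; that position is the below-h count and the rest is the >= h count, replacing A's single linear pass with two counters by sort + binary search.
import Mathlib
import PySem

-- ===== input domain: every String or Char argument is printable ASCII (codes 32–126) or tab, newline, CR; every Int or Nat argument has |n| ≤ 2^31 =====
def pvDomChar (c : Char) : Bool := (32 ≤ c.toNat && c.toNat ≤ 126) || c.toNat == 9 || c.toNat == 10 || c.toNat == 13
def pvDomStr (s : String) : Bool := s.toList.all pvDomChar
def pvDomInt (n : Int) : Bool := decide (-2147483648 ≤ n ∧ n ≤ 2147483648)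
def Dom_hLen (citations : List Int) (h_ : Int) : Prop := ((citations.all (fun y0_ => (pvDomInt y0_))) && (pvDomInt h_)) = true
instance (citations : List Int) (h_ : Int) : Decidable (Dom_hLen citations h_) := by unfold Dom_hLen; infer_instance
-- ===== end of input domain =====

-- B sorts the list and binary-searches the first position with value >= h (alternative algorithm: sort + binary search instead of A's two-counter linear pass).
-- ===== PORT A =====
-- literal port of A: one fold carrying (max_ans, min_ans), branch order as in A
def hLen (citations : List Int) (h_ : Int) : Int × Int :=
  let st := citations.foldl (fun (acc : Int × Int) num =>
    if num ≥ h_ then (acc.1 + 1, acc.2) else (acc.1, acc.2 + 1)) (0, 0)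
  (st.2, st.1)

-- ===== PORT B =====
-- the while loop of Source B; s[mid] is always in range (0 ≤ lo ≤ mid < hi ≤ len throughout), so pyGetD with default 0 is exact here
def hLenBsearch (s : List Int) (h_ : Int) (lo hi : Int) : Int :=
  if hlt : lo < hi then
    let mid := PySem.Int.floordiv (lo + hi) 2
    if PySem.List.pyGetD s mid 0 < h_ then hLenBsearch s h_ (mid + 1) hi
    else hLenBsearch s h_ lo mid
  else lo
termination_by (hi - lo).toNat
decreasing_by
  · have := PySem.Int.floordiv_lt_iff_lt_mul (a := lo + hi) (q := hi) (b := 2) (by omega)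
    have := PySem.Int.le_floordiv_iff_mul_le (a := lo + hi) (q := lo) (b := 2) (by omega)
    omega
  · have := PySem.Int.floordiv_lt_iff_lt_mul (a := lo + hi) (q := hi) (b := 2) (by omega)
    have := PySem.Int.le_floordiv_iff_mul_le (a := lo + hi) (q := lo) (b := 2) (by omega)
    omega

-- port of B: sort, binary-search the split point, derive both counts from it
def hLen_alt (citations : List Int) (h_ : Int) : Int × Int :=
  let s := PySem.List.sorted citations (fun x => x) false
  let lo := hLenBsearch s h_ 0 (s.length : Int)
  (lo, (s.length : Int) - lo)

-- ===== PRECONDITION & SPEC =====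
def Spec_hLen (citations : List Int) (h_ : Int) (out : Int × Int) : Prop := out = hLen_alt citations h_
instance (citations : List Int) (h_ : Int) (out : Int × Int) : Decidable (Spec_hLen citations h_ out) := by unfold Spec_hLen; infer_instance

-- ===== CLAIM (what is proved, stated in full; the proofs are below) =====
def Claim_equal_hLen : Prop := ∀ (citations : List Int) (h_ : Int), Dom_hLen citations h_ → Spec_hLen citations h_ (hLen citations h_)

-- ===== LEMMAS AND PROOFS =====

-- A's loop counts the ≥-h and <-h elements
theorem hLen_fold (citations : List Int) (h_ : Int) (a b : Int) :
    citations.foldl (fun (acc : Int × Int) num =>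
      if num ≥ h_ then (acc.1 + 1, acc.2) else (acc.1, acc.2 + 1)) (a, b)
    = (a + ((citations.filter (fun num => decide (h_ ≤ num))).length : Int),
       b + ((citations.filter (fun num => decide (num < h_))).length : Int)) := by
  induction citations generalizing a b with
  | nil => simp
  | cons x xs ih =>
    simp only [List.foldl_cons, List.filter_cons]
    by_cases hx : x ≥ h_
    · have hx' : ¬ (x < h_) := not_lt.mpr hx
      simp [hx, hx', ih, Prod.mk.injEq]; omega
    · have hx' : x < h_ := not_le.mp hx
      simp [hx, hx', ih, Prod.mk.injEq]; omega

-- if a list splits at index k into a <-h prefix and a ≥-h suffix, the <-h count is k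
theorem split_count (h_ : Int) : ∀ (s : List Int) (k : Nat), k ≤ s.length →
    (∀ (i : Nat) (hi : i < s.length), i < k → s[i] < h_) →
    (∀ (i : Nat) (hi : i < s.length), k ≤ i → h_ ≤ s[i]) →
    (s.filter (fun x => decide (x < h_))).length = k := by
  intro s
  induction s with
  | nil => intro k hk _ _; simp at hk ⊢; omega
  | cons x t ih =>
    intro k hk h1 h2
    cases k with
    | zero =>
      have hall : ∀ y ∈ x :: t, ¬ (decide (y < h_) = true) := by
        intro y hy
        obtain ⟨i, hi, rfl⟩ := List.mem_iff_getElem.mp hy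
        simpa using not_lt.mpr (h2 i hi (Nat.zero_le _))
      simp [List.filter_eq_nil_iff.mpr hall]
    | succ k' =>
      have hx : x < h_ := h1 0 (by simp) (Nat.succ_pos _)
      have hrec : (t.filter (fun x => decide (x < h_))).length = k' := by
        apply ih k' (by simpa using hk)
        · intro i hi hik
          have := h1 (i + 1) (by simpa using Nat.succ_lt_succ hi) (Nat.succ_lt_succ hik)
          simpa using this
        · intro i hi hik
          have := h2 (i + 1) (by simpa using Nat.succ_lt_succ hi) (Nat.succ_le_succ hik)
          simpa using this
      simp [hx, hrec]

-- the binary search maintains the split invariant and lands on the <-h count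
theorem bsearch_inv (s : List Int) (h_ : Int) (hs : s.Pairwise (· ≤ ·)) :
    ∀ (n : Nat) (lo hi : Int), (hi - lo).toNat ≤ n →
    0 ≤ lo → lo ≤ hi → hi ≤ (s.length : Int) →
    (∀ (i : Nat) (hil : i < s.length), (i : Int) < lo → s[i] < h_) →
    (∀ (i : Nat) (hil : i < s.length), hi ≤ (i : Int) → h_ ≤ s[i]) →
    hLenBsearch s h_ lo hi = ((s.filter (fun x => decide (x < h_))).length : Int) := by
  intro n
  induction n with
  | zero =>
    intro lo hi hn h0 hlh hhl inv1 inv2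
    have hnl : ¬ lo < hi := by omega
    rw [hLenBsearch, dif_neg hnl]
    have hk : (s.filter (fun x => decide (x < h_))).length = lo.toNat := by
      apply split_count h_ s lo.toNat (by omega)
      · intro i hi2 hik; exact inv1 i hi2 (by omega)
      · intro i hi2 hik; exact inv2 i hi2 (by omega)
    rw [hk]; omega
  | succ m ih =>
    intro lo hi hn h0 hlh hhl inv1 inv2
    by_cases hlt : lo < hi
    case neg => exact ih lo hi (by omega) h0 hlh hhl inv1 inv2
    rw [hLenBsearch]
    · simp only [hlt, dif_pos]
      have hmid1 := PySem.Int.le_floordiv_iff_mul_le (a := lo + hi) (q := lo) (b := 2) (by omega)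
      have hmid2 := PySem.Int.floordiv_lt_iff_lt_mul (a := lo + hi) (q := hi) (b := 2) (by omega)
      set mid := PySem.Int.floordiv (lo + hi) 2 with hmiddef
      have hlo_mid : lo ≤ mid := hmid1.mpr (by omega)
      have hmid_hi : mid < hi := hmid2.mpr (by omega)
      have hmidrange : mid.toNat < s.length := by omega
      have hget : PySem.List.pyGetD s mid 0 = s[mid.toNat] :=
        PySem.List.pyGetD_eq_getElem (xs := s) (d := 0) (i := mid) (by omega) (by omega)
      have hpw := List.pairwise_iff_getElem.mp hs
      by_cases hc : PySem.List.pyGetD s mid 0 < h_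
      · simp only [hc, if_pos]
        apply ih (mid + 1) hi (by omega) (by omega) (by omega) hhl
        · intro i hil hik
          rcases Nat.lt_or_ge i mid.toNat with hlt' | hge
          · have := hpw i mid.toNat hil hmidrange hlt'
            rw [hget] at hc; omega
          · have : i = mid.toNat := by omega
            subst this; rw [hget] at hc; exact hc
        · exact inv2
      · simp only [hc, if_neg, not_false_iff]
        apply ih lo mid (by omega) h0 (by omega) (by omega) inv1
        intro i hil hik
        rw [hget] at hc
        rcases Nat.lt_or_ge mid.toNat i with hlt' | hge
        · have := hpw mid.toNat i hmidrange hil hlt'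
          omega
        · have : i = mid.toNat := by omega
          subst this; omega

-- ===== VERDICT (by name: the statement is the Claim_ definition above) =====
theorem hLen_spec : Claim_equal_hLen := by
  intro citations h_ _
  unfold Spec_hLen hLen hLen_alt
  have hperm : (PySem.List.sorted citations (fun x => x) false).Perm citations :=
    PySem.List.sorted_perm citations (fun x => x) false
  have hpw : (PySem.List.sorted citations (fun x => x) false).Pairwise (· ≤ ·) := by
    simpa using PySem.List.sorted_pairwise (xs := citations) (key := fun x => x)
  set s := PySem.List.sorted citations (fun x => x) false with hsdef
  have hb := bsearch_inv s h_ hpw ((s.length : Int) - 0).toNat 0 (s.length : Int)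
    (le_refl _) (le_refl _) (by positivity) (le_refl _)
    (by intro i hil hneg; omega)
    (by intro i hil hge; omega)
  rw [hLen_fold]
  have hfilt_lt : (s.filter (fun x => decide (x < h_))).length
      = (citations.filter (fun x => decide (x < h_))).length :=
    (hperm.filter _).length_eq
  have hfilt_ge : (s.filter (fun x => decide (h_ ≤ x))).length
      = (citations.filter (fun x => decide (h_ ≤ x))).length :=
    (hperm.filter _).length_eq
  have hsum : (s.filter (fun x => decide (x < h_))).length
      + (s.filter (fun x => decide (h_ ≤ x))).length = s.length := by
    induction s with
    | nil => simp
    | cons x t iht =>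
      by_cases hx : x < h_
      · have hx' : ¬ (h_ ≤ x) := not_le.mpr hx
        simp [hx, hx']; omega
      · have hx' : h_ ≤ x := not_lt.mp hx
        simp [hx, hx']; omega
  have hlen : s.length = citations.length := hperm.length_eq
  simp only [hb, Prod.mk.injEq]
  constructor
  · rw [hfilt_lt]; omega
  · rw [hfilt_lt] at hsum ⊢; rw [hfilt_ge] at hsum; omega
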